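-- pv_equiv track=rewrite | github.com/travelingpiano/EPI-Problems | Strings/sinusoidal.py | sinusoidal
-- ===== SOURCE A (Python) =====
-- def sinusoidal(input_str):
--     top_substr = ""
--     middle_substr = ""
--     bottom_substr = ""
--     for i in range(len(input_str)):
--         if i%2 == 0:
--             middle_substr += input_str[i]
--         elif (i-1)%4 == 0:
--             top_substr += input_str[i]
--         else:
--             bottom_substr += input_str[i]
--     return top_substr + middle_substr + bottom_substr
-- ===== SOURCE B (Python) =====
-- def sinusoidal(input_str):
--     return input_str[1::4] + input_str[0::2] + input_str[3::4]
-- ===== Notes on version B (the rewrite author's own statement) =====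
-- stated objective: simpler
-- what changed: Replaces the per-index modular-branching accumulation loop by three independent strided slices (input_str[1::4] + input_str[0::2] + input_str[3::4]) concatenated directly.
import Mathlib
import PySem

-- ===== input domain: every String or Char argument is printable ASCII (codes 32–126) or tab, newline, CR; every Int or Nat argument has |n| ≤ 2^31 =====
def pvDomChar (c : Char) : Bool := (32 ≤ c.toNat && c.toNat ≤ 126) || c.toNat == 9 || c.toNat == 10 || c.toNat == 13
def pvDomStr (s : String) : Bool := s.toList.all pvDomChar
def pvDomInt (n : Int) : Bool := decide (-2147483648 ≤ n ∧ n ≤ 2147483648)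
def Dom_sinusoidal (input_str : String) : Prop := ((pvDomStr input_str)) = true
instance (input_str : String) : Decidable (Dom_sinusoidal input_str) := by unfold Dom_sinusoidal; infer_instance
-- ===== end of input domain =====

-- B replaces A's per-index modular-branching loop by three strided slices (s[1::4] + s[0::2] + s[3::4]); objective: simpler.


-- ===== PORT A =====
-- the for-loop over range(len(input_str)): index i, three accumulators (top, middle, bottom)
def sinLoop : List Char → Nat → List Char × List Char × List Char → List Char × List Char × List Char
  | [], _, acc => acc
  | c :: rest, i, (top, mid, bot) =>
    if i % 2 = 0 then sinLoop rest (i + 1) (top, mid ++ [c], bot)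
    else if (i - 1) % 4 = 0 then sinLoop rest (i + 1) (top ++ [c], mid, bot)
    else sinLoop rest (i + 1) (top, mid, bot ++ [c])

def sinusoidal (input_str : String) : String :=
  match sinLoop input_str.toList 0 ([], [], []) with
  | (top, mid, bot) => String.ofList (top ++ mid ++ bot)

-- ===== PORT B =====
-- input_str[1::4] + input_str[0::2] + input_str[3::4], at the code-point level
def sinusoidal_alt (input_str : String) : String :=
  let cs := input_str.toList
  String.ofList (((PySem.List.slice? cs (some 1) none 4).getD []) ++
                 ((PySem.List.slice? cs (some 0) none 2).getD []) ++
                 ((PySem.List.slice? cs (some 3) none 4).getD []))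

-- ===== PRECONDITION & SPEC =====
def Spec_sinusoidal (input_str : String) (out : String) : Prop := out = sinusoidal_alt input_str
instance (input_str : String) (out : String) : Decidable (Spec_sinusoidal input_str out) := by unfold Spec_sinusoidal; infer_instance

-- ===== CLAIM (what is proved, stated in full; the proofs are below) =====
def Claim_equal_sinusoidal : Prop := ∀ (input_str : String), Dom_sinusoidal input_str → Spec_sinusoidal input_str (sinusoidal input_str)

-- ===== LEMMAS AND PROOFS =====

/-- every t-th element, starting with the head -/
def everyNth (t : Nat) : List Char → List Char
  | [] => []
  | c :: rest => c :: everyNth t (rest.drop (t - 1))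
termination_by cs => cs.length
decreasing_by simp only [List.length_drop, List.length_cons]; omega

/-- the elements at positions ≡ r (mod t), starting the position count at i -/
def pick (t r : Nat) : List Char → Nat → List Char
  | [], _ => []
  | c :: rest, i => if i % t = r then c :: pick t r rest (i + 1) else pick t r rest (i + 1)

lemma everyNth_nil (t : Nat) : everyNth t [] = [] := by rw [everyNth]

lemma everyNth_cons (t : Nat) (c : Char) (rest : List Char) :
    everyNth t (c :: rest) = c :: everyNth t (rest.drop (t - 1)) := by rw [everyNth]

lemma core (t : Nat) (ht : 0 < t) : ∀ (ys : List Char),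
    (List.range ((ys.length + t - 1) / t)).filterMap (fun k => ys[t * k]?) = everyNth t ys := by
  intro ys
  induction ys using everyNth.induct t with
  | case1 => simp [everyNth_nil]
  | case2 c rest ih =>
    rw [everyNth_cons]
    have hlen : (c :: rest).length = rest.length + 1 := by simp
    have hcnt : ((c :: rest).length + t - 1) / t = rest.length / t + 1 := by
      rw [hlen]
      have : rest.length + 1 + t - 1 = rest.length + t := by omega
      rw [this, Nat.add_div_right _ ht]
    rw [hcnt, List.range_succ_eq_map, List.filterMap_cons, List.filterMap_map]
    have h0 : (c :: rest)[t * 0]? = some c := by simp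
    rw [h0]
    have hshift : ∀ k : Nat, (c :: rest)[t * (k + 1)]? = (rest.drop (t - 1))[t * k]? := by
      intro k
      have h1 : t * (k + 1) = (t - 1 + t * k) + 1 := by
        rw [Nat.mul_succ]; omega
      rw [List.getElem?_drop, h1]
      simp
    have hfun : (List.range (rest.length / t)).filterMap ((fun k => (c :: rest)[t * k]?) ∘ Nat.succ)
        = (List.range (rest.length / t)).filterMap (fun k => (rest.drop (t - 1))[t * k]?) := by
      apply List.filterMap_congr
      intro k _
      simpa using hshift k
    rw [hfun]
    have hlen2 : ((rest.drop (t - 1)).length + t - 1) / t = rest.length / t := by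
      rcases Nat.lt_or_ge rest.length (t - 1) with h | h
      · have h1 : (rest.drop (t - 1)).length = 0 := by simp; omega
        rw [h1, Nat.div_eq_of_lt (by omega), Nat.div_eq_of_lt (by omega)]
      · have h1 : (rest.drop (t - 1)).length + t - 1 = rest.length := by simp; omega
        rw [h1]
    rw [← hlen2, ih]

lemma slice?_stride (a t : Nat) (ht : 0 < t) (xs : List Char) :
    PySem.List.slice? xs (some (a : Int)) none (t : Int) = some (everyNth t (xs.drop a)) := by
  unfold PySem.List.slice? PySem.List.sliceIndices
  have h1 : ¬ ((t:Int) = 0) := by omega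
  have h2 : ¬ ((t:Int) < 0) := by omega
  have h3 : ¬ ((a:Int) < 0) := by omega
  have h4 : (0:Int) < (t:Int) := by omega
  simp only [h1, h2, h3, h4, if_false, if_pos]
  rcases Nat.lt_or_ge a xs.length with hlt | hle
  · have hmin : min (a:Int) (xs.length:Int) = (a:Int) := by omega
    have hcond : (a:Int) < (xs.length:Int) := by exact_mod_cast hlt
    rw [hmin, if_pos hcond]
    have hnum : (xs.length:Int) - a + t - 1 = (((xs.length - a) + t - 1 : Nat) : Int) := by
      omega
    have hcnt : (((xs.length:Int) - a + t - 1) / t).toNat = ((xs.length - a) + t - 1) / t := by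
      rw [hnum, ← Int.natCast_div, Int.toNat_natCast]
    rw [hcnt]
    have hfun : (List.range (((xs.length - a) + t - 1) / t)).filterMap
          (fun k : Nat => xs[((a:Int) + (t:Int) * (k:Int)).toNat]?)
        = (List.range (((xs.length - a) + t - 1) / t)).filterMap
          (fun k => (xs.drop a)[t * k]?) := by
      apply List.filterMap_congr
      intro k _
      have hi : ((a:Int) + t * k).toNat = a + t * k := by
        have : ((a:Int) + t * k) = ((a + t * k : Nat) : Int) := by push_cast; ring
        rw [this, Int.toNat_natCast]
      rw [hi, ← List.getElem?_drop]
    rw [hfun]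
    have hlen : xs.length - a = (xs.drop a).length := by simp
    rw [hlen, core t ht]
  · have hmin : min (a:Int) (xs.length:Int) = (xs.length:Int) := by omega
    have hcond : ¬ ((xs.length:Int) < (xs.length:Int)) := by omega
    rw [hmin, if_neg hcond]
    have hdrop : xs.drop a = [] := List.drop_eq_nil_of_le hle
    simp [hdrop, everyNth_nil]

lemma sinLoop_eq : ∀ (cs : List Char) (i : Nat) (t m b : List Char),
    sinLoop cs i (t, m, b) = (t ++ pick 4 1 cs i, m ++ pick 2 0 cs i, b ++ pick 4 3 cs i) := by
  intro cs
  induction cs with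
  | nil => intro i t m b; simp [sinLoop, pick]
  | cons c rest ih =>
    intro i t m b
    by_cases h2 : i % 2 = 0
    · have hn1 : ¬ (i % 4 = 1) := by omega
      have hn3 : ¬ (i % 4 = 3) := by omega
      simp [sinLoop, pick, h2, ih]
      omega
    · by_cases h4 : (i - 1) % 4 = 0
      · have h1 : i % 4 = 1 := by omega
        have hn0 : ¬ (i % 2 = 0) := h2
        simp [sinLoop, pick, hn0, h4, h1, ih]
      · have h3 : i % 4 = 3 := by omega
        simp [sinLoop, pick, h2, h4, h3, ih]

lemma pick41 (cs : List Char) : ∀ i, pick 4 1 cs i = everyNth 4 (cs.drop ((5 - i % 4) % 4)) := by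
  induction cs with
  | nil => intro i; simp [pick, everyNth_nil]
  | cons c rest ih =>
    intro i
    by_cases h : i % 4 = 1
    · have hd : (5 - i % 4) % 4 = 0 := by omega
      have h2 : (5 - (i + 1) % 4) % 4 = 3 := by omega
      simp only [pick, if_pos h, ih (i + 1), hd, h2, List.drop_zero, everyNth_cons]
    · have hd : (5 - i % 4) % 4 = (5 - (i + 1) % 4) % 4 + 1 := by omega
      simp only [pick, if_neg h, ih (i + 1), hd, List.drop_succ_cons]

lemma pick20 (cs : List Char) : ∀ i, pick 2 0 cs i = everyNth 2 (cs.drop ((2 - i % 2) % 2)) := by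
  induction cs with
  | nil => intro i; simp [pick, everyNth_nil]
  | cons c rest ih =>
    intro i
    by_cases h : i % 2 = 0
    · have hd : (2 - i % 2) % 2 = 0 := by omega
      have h2 : (2 - (i + 1) % 2) % 2 = 1 := by omega
      simp only [pick, if_pos h, ih (i + 1), hd, h2, List.drop_zero, everyNth_cons]
    · have hd : (2 - i % 2) % 2 = (2 - (i + 1) % 2) % 2 + 1 := by omega
      simp only [pick, if_neg h, ih (i + 1), hd, List.drop_succ_cons]

lemma pick43 (cs : List Char) : ∀ i, pick 4 3 cs i = everyNth 4 (cs.drop ((7 - i % 4) % 4)) := by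
  induction cs with
  | nil => intro i; simp [pick, everyNth_nil]
  | cons c rest ih =>
    intro i
    by_cases h : i % 4 = 3
    · have hd : (7 - i % 4) % 4 = 0 := by omega
      have h2 : (7 - (i + 1) % 4) % 4 = 3 := by omega
      simp only [pick, if_pos h, ih (i + 1), hd, h2, List.drop_zero, everyNth_cons]
    · have hd : (7 - i % 4) % 4 = (7 - (i + 1) % 4) % 4 + 1 := by omega
      simp only [pick, if_neg h, ih (i + 1), hd, List.drop_succ_cons]

-- ===== VERDICT (by name: the statement is the Claim_ definition above) =====
theorem sinusoidal_spec : Claim_equal_sinusoidal := by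
  intro s _
  unfold Spec_sinusoidal sinusoidal sinusoidal_alt
  rw [sinLoop_eq]
  have s1 := slice?_stride 1 4 (by norm_num) s.toList
  have s2 := slice?_stride 0 2 (by norm_num) s.toList
  have s3 := slice?_stride 3 4 (by norm_num) s.toList
  norm_num at s1 s2 s3
  simp only [s1, s2, s3, Option.getD_some, List.nil_append]
  rw [pick41 s.toList 0, pick20 s.toList 0, pick43 s.toList 0]
  norm_num
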